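-- pv_equiv track=rewrite | github.com/naqushab/ScalerAcademy | Scaler/Advanced/Queues and Deques/Sum of min and max.py | solve
-- ===== SOURCE A (Python) =====
-- import collections
--
-- def solve(A, B):
--     max_q = collections.deque()
--     min_q = collections.deque()
--     ans = 0
--     window_start = 0
--     for window_end in range(len(A)):
--         n = A[window_end]
--         while max_q and n > max_q[-1]:
--             max_q.pop()
--         while min_q and n < min_q[-1]:
--             min_q.pop()
--         if not max_q or max_q[-1] >= n:
--             max_q.append(n)
--         if not min_q or min_q[-1] <= n:
--             min_q.append(n)
--         if window_end - window_start + 1 == B: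
--             ans += (max_q[0] + min_q[0]) % ((10**9) + 7)
--             if A[window_start] == max_q[0]:
--                 max_q.popleft()
--             if A[window_start] == min_q[0]:
--                 min_q.popleft()
--             window_start += 1
--     return ans % ((10**9) + 7)
-- ===== SOURCE B (Python) =====
-- MOD = 10**9 + 7
--
-- def solve(A, B):
--     if B < 1 or B > len(A):
--         return 0
--     ans = 0
--     for i in range(len(A) - B + 1):
--         w = A[i:i+B]
--         ans += (max(w) + min(w)) % MOD
--     return ans % MOD
-- ===== Notes on version B (the rewrite author's own statement) =====
-- stated objective: simpler
-- what changed: Replaces the two monotonic deques maintained in one pass by an explicit guard (B < 1 or B > len(A) returns 0) plus a brute-force rescan of each window A[i:i+B] with builtin max/min.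
import Mathlib
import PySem

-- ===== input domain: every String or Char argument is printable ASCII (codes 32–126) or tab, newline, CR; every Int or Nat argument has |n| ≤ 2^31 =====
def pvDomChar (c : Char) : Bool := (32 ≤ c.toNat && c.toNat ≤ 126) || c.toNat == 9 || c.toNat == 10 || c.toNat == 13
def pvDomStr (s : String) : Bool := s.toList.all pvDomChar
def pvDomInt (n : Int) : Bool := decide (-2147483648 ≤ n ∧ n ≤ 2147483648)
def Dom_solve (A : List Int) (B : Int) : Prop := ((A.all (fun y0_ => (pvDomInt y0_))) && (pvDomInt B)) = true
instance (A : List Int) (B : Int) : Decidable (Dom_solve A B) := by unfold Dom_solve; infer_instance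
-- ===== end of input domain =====

-- B replaces A's two monotonic deques and single pass by a direct rescan of each
-- window with builtin max/min (objective: simpler; not faster).

-- ===== PORT A =====
-- while max_q and p max_q[-1]: max_q.pop()   (pop from the right end of the deque)
def popR (p : Int → Bool) (q : List Int) : List Int := (q.reverse.dropWhile p).reverse

def solveStep (A : List Int) (B : Int) (st : List Int × List Int × Int × Int) (j : Int) :
    List Int × List Int × Int × Int :=
  match st with
  | (maxq, minq, ans, ws) =>
    let n := (PySem.List.pyGet? A j).getD 0          -- A[window_end]; always in range here
    let maxq1 := popR (fun x => decide (x < n)) maxq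
    let minq1 := popR (fun x => decide (n < x)) minq
    let maxq2 := if maxq1.getLast?.all (fun x => decide (n ≤ x)) then maxq1 ++ [n] else maxq1
    let minq2 := if minq1.getLast?.all (fun x => decide (x ≤ n)) then minq1 ++ [n] else minq1
    if j - ws + 1 = B then
      let ans' := ans + PySem.Int.mod (maxq2.headD 0 + minq2.headD 0) 1000000007
      let a0 := (PySem.List.pyGet? A ws).getD 0      -- A[window_start]; always in range here
      let maxq3 := if a0 = maxq2.headD 0 then maxq2.tail else maxq2
      let minq3 := if a0 = minq2.headD 0 then minq2.tail else minq2
      (maxq3, minq3, ans', ws + 1)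
    else (maxq2, minq2, ans, ws)

def solve (A : List Int) (B : Int) : Int :=
  let st := (PySem.List.pyRange 0 (A.length : Int) 1).foldl (solveStep A B) ([], [], 0, 0)
  PySem.Int.mod st.2.2.1 1000000007

-- ===== PORT B =====
def solve_alt (A : List Int) (B : Int) : Int :=
  if B < 1 ∨ (A.length : Int) < B then 0
  else
    let ans := (PySem.List.pyRange 0 ((A.length : Int) - B + 1) 1).foldl
      (fun ans i =>
        let w := PySem.List.slice A (some i) (some (i + B))
        ans + PySem.Int.mod ((PySem.List.max? w (fun y => y)).getD 0 +
                             (PySem.List.min? w (fun y => y)).getD 0) 1000000007) 0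
    PySem.Int.mod ans 1000000007

-- ===== PRECONDITION & SPEC =====
def Spec_solve (A : List Int) (B : Int) (out : Int) : Prop := out = solve_alt A B
instance (A : List Int) (B : Int) (out : Int) : Decidable (Spec_solve A B out) := by unfold Spec_solve; infer_instance

-- ===== CLAIM (what is proved, stated in full; the proofs are below) =====
def Claim_equal_solve : Prop := ∀ (A : List Int) (B : Int), Dom_solve A B → Spec_solve A B (solve A B)

-- ===== LEMMAS AND PROOFS =====

-- the monotone max-deque / min-deque contents as a function of the current window
def pvMx : List Int → List Int
  | [] => []
  | x :: w => if w.all (fun y => decide (y ≤ x)) then x :: pvMx w else pvMx w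

def pvMn : List Int → List Int
  | [] => []
  | x :: w => if w.all (fun y => decide (x ≤ y)) then x :: pvMn w else pvMn w

-- window A[a:b]
def pvW (A : List Int) (a b : Nat) : List Int := (A.drop a).take (b - a)

-- ans after j iterations of A's loop (Bn = B as a Nat, Bn ≥ 1)
def pvAns (A : List Int) (Bn : Nat) : Nat → Int
  | 0 => 0
  | j+1 => pvAns A Bn j +
      if Bn ≤ j+1 then
        PySem.Int.mod ((pvMx (pvW A (j+1-Bn) (j+1))).headD 0 +
                       (pvMn (pvW A (j+1-Bn) (j+1))).headD 0) 1000000007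
      else 0

lemma mem_pvMx {y : Int} : ∀ {w : List Int}, y ∈ pvMx w → y ∈ w := by
  intro w
  induction w with
  | nil => simp [pvMx]
  | cons x w ih =>
    simp only [pvMx]
    split
    · intro h
      rcases List.mem_cons.1 h with h | h
      · simp [h]
      · exact List.mem_cons_of_mem _ (ih h)
    · intro h; exact List.mem_cons_of_mem _ (ih h)

lemma mem_pvMn {y : Int} : ∀ {w : List Int}, y ∈ pvMn w → y ∈ w := by
  intro w
  induction w with
  | nil => simp [pvMn]
  | cons x w ih =>
    simp only [pvMn]
    split
    · intro h
      rcases List.mem_cons.1 h with h | h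
      · simp [h]
      · exact List.mem_cons_of_mem _ (ih h)
    · intro h; exact List.mem_cons_of_mem _ (ih h)

lemma dropWhile_append_last {α : Type} (p : α → Bool) (l : List α) (x : α) (hx : p x = false) :
    (l ++ [x]).dropWhile p = l.dropWhile p ++ [x] := by
  induction l with
  | nil => simp [hx]
  | cons a l ih => by_cases h : p a <;> simp [List.dropWhile_cons, h, ih]  -- keep: used in cons case

lemma popR_eq_nil (p : Int → Bool) (q : List Int) (h : ∀ y ∈ q, p y = true) :
    popR p q = [] := by
  unfold popR
  rw [List.dropWhile_eq_nil_iff.2 (fun a ha => h a (List.mem_reverse.1 ha))]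
  rfl

lemma popR_cons_neg (p : Int → Bool) (q : List Int) (x : Int) (hx : p x = false) :
    popR p (x :: q) = x :: popR p q := by
  unfold popR
  rw [show (x :: q).reverse = q.reverse ++ [x] by simp,
      dropWhile_append_last p q.reverse x hx]
  simp

lemma pvMx_push (w : List Int) (n : Int) :
    pvMx (w ++ [n]) = popR (fun x => decide (x < n)) (pvMx w) ++ [n] := by
  induction w with
  | nil => simp [pvMx, popR]
  | cons x w' ih =>
    by_cases hall : w'.all (fun y => decide (y ≤ x)) = true
    · have hle : ∀ y ∈ w', y ≤ x := fun y hy => by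
        simpa using List.all_eq_true.1 hall y hy
      by_cases hxn : x < n
      · have hcond : ((w' ++ [n]).all (fun y => decide (y ≤ x))) = false := by
          simp only [List.all_append, List.all_cons, List.all_nil, Bool.and_true]
          simp [show ¬ n ≤ x by omega]
        have hnil : popR (fun y => decide (y < n)) (pvMx w') = [] :=
          popR_eq_nil _ _ (fun y hy => by
            have := hle y (mem_pvMx hy); simp; omega)
        have hnil2 : popR (fun y => decide (y < n)) (x :: pvMx w') = [] :=
          popR_eq_nil _ _ (fun y hy => by
            rcases List.mem_cons.1 hy with h | h
            · simp [h]; omega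
            · have := hle y (mem_pvMx h); simp; omega)
        rw [show (x :: w') ++ [n] = x :: (w' ++ [n]) by simp]
        simp only [pvMx, hcond, if_false, if_pos hall, ih, hnil, hnil2]
        simp
      · have hcond : ((w' ++ [n]).all (fun y => decide (y ≤ x))) = true := by
          simp only [List.all_append, List.all_cons, List.all_nil, Bool.and_true]
          simp [hall, show n ≤ x by omega]
        rw [show (x :: w') ++ [n] = x :: (w' ++ [n]) by simp]
        simp only [pvMx, hcond, if_true, if_pos hall, ih]
        rw [popR_cons_neg _ _ x (by simp [decide_eq_false_iff_not]; omega)]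
        simp
    · have hcond : ((w' ++ [n]).all (fun y => decide (y ≤ x))) = false := by
        simp only [List.all_append]
        simp only [Bool.and_eq_false_iff]
        left
        exact Bool.eq_false_iff.2 hall
      rw [show (x :: w') ++ [n] = x :: (w' ++ [n]) by simp]
      simp only [pvMx, hcond, if_neg hall, ih]
      simp

lemma pvMn_push (w : List Int) (n : Int) :
    pvMn (w ++ [n]) = popR (fun x => decide (n < x)) (pvMn w) ++ [n] := by
  induction w with
  | nil => simp [pvMn, popR]
  | cons x w' ih =>
    by_cases hall : w'.all (fun y => decide (x ≤ y)) = true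
    · have hle : ∀ y ∈ w', x ≤ y := fun y hy => by
        simpa using List.all_eq_true.1 hall y hy
      by_cases hxn : n < x
      · have hcond : ((w' ++ [n]).all (fun y => decide (x ≤ y))) = false := by
          simp only [List.all_append, List.all_cons, List.all_nil, Bool.and_true]
          simp [show ¬ x ≤ n by omega]
        have hnil : popR (fun y => decide (n < y)) (pvMn w') = [] :=
          popR_eq_nil _ _ (fun y hy => by
            have := hle y (mem_pvMn hy); simp; omega)
        have hnil2 : popR (fun y => decide (n < y)) (x :: pvMn w') = [] :=
          popR_eq_nil _ _ (fun y hy => by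
            rcases List.mem_cons.1 hy with h | h
            · simp [h]; omega
            · have := hle y (mem_pvMn h); simp; omega)
        rw [show (x :: w') ++ [n] = x :: (w' ++ [n]) by simp]
        simp only [pvMn, hcond, if_false, if_pos hall, ih, hnil, hnil2]
        simp
      · have hcond : ((w' ++ [n]).all (fun y => decide (x ≤ y))) = true := by
          simp only [List.all_append, List.all_cons, List.all_nil, Bool.and_true]
          simp [hall, show x ≤ n by omega]
        rw [show (x :: w') ++ [n] = x :: (w' ++ [n]) by simp]
        simp only [pvMn, hcond, if_true, if_pos hall, ih]
        rw [popR_cons_neg _ _ x (by simp [decide_eq_false_iff_not]; omega)]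
        simp
    · have hcond : ((w' ++ [n]).all (fun y => decide (x ≤ y))) = false := by
        simp only [List.all_append]
        simp only [Bool.and_eq_false_iff]
        left
        exact Bool.eq_false_iff.2 hall
      rw [show (x :: w') ++ [n] = x :: (w' ++ [n]) by simp]
      simp only [pvMn, hcond, if_neg hall, ih]
      simp

lemma head?_dropWhile_not {α : Type} (p : α → Bool) (l : List α) :
    ∀ x, (l.dropWhile p).head? = some x → p x = false := by
  induction l with
  | nil => intro x h; simp at h
  | cons a l ih =>
    intro x h
    by_cases ha : p a
    · rw [List.dropWhile_cons, if_pos ha] at h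
      exact ih x h
    · rw [List.dropWhile_cons, if_neg ha] at h
      simp at h
      subst h
      exact Bool.eq_false_iff.2 ha

lemma popR_getLast_not (p : Int → Bool) (q : List Int) :
    ∀ x, (popR p q).getLast? = some x → p x = false := by
  intro x h
  unfold popR at h
  rw [List.getLast?_reverse] at h
  exact head?_dropWhile_not p q.reverse x h

lemma pvMx_head (w : List Int) (hw : w ≠ []) :
    pvMx w ≠ [] ∧ (pvMx w).headD 0 ∈ w ∧ ∀ y ∈ w, y ≤ (pvMx w).headD 0 := by
  induction w with
  | nil => exact absurd rfl hw
  | cons x w' ih =>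
    by_cases hall : w'.all (fun y => decide (y ≤ x)) = true
    · have hle : ∀ y ∈ w', y ≤ x := fun y hy => by
        simpa using List.all_eq_true.1 hall y hy
      simp only [pvMx, if_pos hall]
      refine ⟨by simp, by simp, ?_⟩
      intro y hy
      rcases List.mem_cons.1 hy with h | h
      · simp [h]
      · simpa using hle y h
    · obtain ⟨y, hy, hyx⟩ : ∃ y ∈ w', x < y := by
        rcases List.all_eq_true.not.1 hall with h
        push_neg at h
        obtain ⟨y, hy, hp⟩ := h
        exact ⟨y, hy, by simpa using hp⟩
      have hw' : w' ≠ [] := by rintro rfl; simp at hy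
      obtain ⟨h1, h2, h3⟩ := ih hw'
      simp only [pvMx, if_neg hall]
      refine ⟨h1, List.mem_cons_of_mem _ h2, ?_⟩
      intro z hz
      rcases List.mem_cons.1 hz with h | h
      · subst h; exact le_of_lt (lt_of_lt_of_le hyx (h3 y hy))
      · exact h3 z h

lemma pvMn_head (w : List Int) (hw : w ≠ []) :
    pvMn w ≠ [] ∧ (pvMn w).headD 0 ∈ w ∧ ∀ y ∈ w, (pvMn w).headD 0 ≤ y := by
  induction w with
  | nil => exact absurd rfl hw
  | cons x w' ih =>
    by_cases hall : w'.all (fun y => decide (x ≤ y)) = true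
    · have hle : ∀ y ∈ w', x ≤ y := fun y hy => by
        simpa using List.all_eq_true.1 hall y hy
      simp only [pvMn, if_pos hall]
      refine ⟨by simp, by simp, ?_⟩
      intro y hy
      rcases List.mem_cons.1 hy with h | h
      · simp [h]
      · simpa using hle y h
    · obtain ⟨y, hy, hyx⟩ : ∃ y ∈ w', y < x := by
        rcases List.all_eq_true.not.1 hall with h
        push_neg at h
        obtain ⟨y, hy, hp⟩ := h
        exact ⟨y, hy, by simpa using hp⟩
      have hw' : w' ≠ [] := by rintro rfl; simp at hy
      obtain ⟨h1, h2, h3⟩ := ih hw'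
      simp only [pvMn, if_neg hall]
      refine ⟨h1, List.mem_cons_of_mem _ h2, ?_⟩
      intro z hz
      rcases List.mem_cons.1 hz with h | h
      · subst h; exact le_of_lt (lt_of_le_of_lt (h3 y hy) hyx)
      · exact h3 z h

lemma pvMx_popleft (x : Int) (w : List Int) :
    (if x = (pvMx (x :: w)).headD 0 then (pvMx (x :: w)).tail else pvMx (x :: w)) = pvMx w := by
  by_cases hall : w.all (fun y => decide (y ≤ x)) = true
  · have hMx : pvMx (x :: w) = x :: pvMx w := by
      simp only [pvMx, if_pos hall]
    rw [hMx]
    simp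
  · obtain ⟨y, hy, hyx⟩ : ∃ y ∈ w, x < y := by
      rcases List.all_eq_true.not.1 hall with h
      push_neg at h
      obtain ⟨y, hy, hp⟩ := h
      exact ⟨y, hy, by simpa using hp⟩
    have hw : w ≠ [] := by rintro rfl; simp at hy
    obtain ⟨h1, h2, h3⟩ := pvMx_head w hw
    have hne : x ≠ (pvMx w).headD 0 := by
      have := h3 y hy; omega
    simp only [pvMx, if_neg hall]
    rw [if_neg hne]

lemma pvMn_popleft (x : Int) (w : List Int) :
    (if x = (pvMn (x :: w)).headD 0 then (pvMn (x :: w)).tail else pvMn (x :: w)) = pvMn w := by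
  by_cases hall : w.all (fun y => decide (x ≤ y)) = true
  · have hMn : pvMn (x :: w) = x :: pvMn w := by
      simp only [pvMn, if_pos hall]
    rw [hMn]
    simp
  · obtain ⟨y, hy, hyx⟩ : ∃ y ∈ w, y < x := by
      rcases List.all_eq_true.not.1 hall with h
      push_neg at h
      obtain ⟨y, hy, hp⟩ := h
      exact ⟨y, hy, by simpa using hp⟩
    have hw : w ≠ [] := by rintro rfl; simp at hy
    obtain ⟨h1, h2, h3⟩ := pvMn_head w hw
    have hne : x ≠ (pvMn w).headD 0 := by
      have := h3 y hy; omega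
    simp only [pvMn, if_neg hall]
    rw [if_neg hne]

lemma max?_eq_pvMx_head (w : List Int) (hw : w ≠ []) :
    (PySem.List.max? w (fun y => y)).getD 0 = (pvMx w).headD 0 := by
  obtain ⟨m, hm⟩ : ∃ m, PySem.List.max? w (fun y => y) = some m := by
    cases h : PySem.List.max? w (fun y => y) with
    | none => exact absurd ((PySem.List.max?_eq_none_iff w (fun y => y)).1 h) hw
    | some m => exact ⟨m, rfl⟩
  obtain ⟨h1, h2, h3⟩ := pvMx_head w hw
  have hmem : m ∈ w := PySem.List.max?_mem hm
  have hmax : ∀ y ∈ w, y ≤ m := PySem.List.max?_isMax hm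
  rw [hm]
  exact le_antisymm (h3 m hmem) (hmax _ h2)

lemma min?_eq_pvMn_head (w : List Int) (hw : w ≠ []) :
    (PySem.List.min? w (fun y => y)).getD 0 = (pvMn w).headD 0 := by
  obtain ⟨m, hm⟩ : ∃ m, PySem.List.min? w (fun y => y) = some m := by
    cases h : PySem.List.min? w (fun y => y) with
    | none => exact absurd ((PySem.List.min?_eq_none_iff w (fun y => y)).1 h) hw
    | some m => exact ⟨m, rfl⟩
  obtain ⟨h1, h2, h3⟩ := pvMn_head w hw
  have hmem : m ∈ w := PySem.List.min?_mem hm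
  have hmin : ∀ y ∈ w, m ≤ y := PySem.List.min?_isMin hm
  rw [hm]
  exact le_antisymm (hmin _ h2) (h3 m hmem)

-- windows grow on the right and shrink on the left
lemma pvW_snoc (A : List Int) (a b : Nat) (ha : a ≤ b) (hb : b < A.length) :
    pvW A a (b+1) = pvW A a b ++ [A[b]] := by
  unfold pvW
  rw [show b + 1 - a = (b - a) + 1 by omega, List.take_succ]
  congr 1
  rw [List.getElem?_drop]
  rw [show a + (b - a) = b by omega]
  simp [List.getElem?_eq_getElem hb]

lemma pvW_cons (A : List Int) (a b : Nat) (ha : a < b) (hb : b ≤ A.length) :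
    pvW A a b = A[a]'(by omega) :: pvW A (a+1) b := by
  unfold pvW
  rw [List.drop_eq_getElem_cons (by omega), show b - a = (b - (a+1)) + 1 by omega,
    List.take_succ_cons]

lemma pvMx_step (w : List Int) (n : Int) :
    (if (popR (fun x => decide (x < n)) (pvMx w)).getLast?.all (fun x => decide (n ≤ x))
     then popR (fun x => decide (x < n)) (pvMx w) ++ [n]
     else popR (fun x => decide (x < n)) (pvMx w)) = pvMx (w ++ [n]) := by
  have hcond : (popR (fun x => decide (x < n)) (pvMx w)).getLast?.all
      (fun x => decide (n ≤ x)) = true := by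
    cases h : (popR (fun x => decide (x < n)) (pvMx w)).getLast? with
    | none => rfl
    | some x =>
      have h2 := popR_getLast_not _ _ x h
      simp at h2 ⊢
      omega
  rw [if_pos hcond, pvMx_push]

lemma pvMn_step (w : List Int) (n : Int) :
    (if (popR (fun x => decide (n < x)) (pvMn w)).getLast?.all (fun x => decide (x ≤ n))
     then popR (fun x => decide (n < x)) (pvMn w) ++ [n]
     else popR (fun x => decide (n < x)) (pvMn w)) = pvMn (w ++ [n]) := by
  have hcond : (popR (fun x => decide (n < x)) (pvMn w)).getLast?.all
      (fun x => decide (x ≤ n)) = true := by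
    cases h : (popR (fun x => decide (n < x)) (pvMn w)).getLast? with
    | none => rfl
    | some x =>
      have h2 := popR_getLast_not _ _ x h
      simp at h2 ⊢
      omega
  rw [if_pos hcond, pvMn_push]

-- the loop invariant: state after j iterations
lemma solve_inv (A : List Int) (Bn : Nat) (hB : 1 ≤ Bn) (j : Nat) (hj : j ≤ A.length) :
    ((List.range j).map (fun k => ((k : Nat) : Int))).foldl (solveStep A (Bn : Int)) ([], [], 0, 0) =
      (pvMx (pvW A (j+1-Bn) j), pvMn (pvW A (j+1-Bn) j), pvAns A Bn j, ((j+1-Bn : Nat) : Int)) := by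
  induction j with
  | zero =>
    simp [pvW, pvAns, Nat.sub_eq_zero_of_le hB, pvMx, pvMn]
  | succ j ih =>
    have hj' : j < A.length := by omega
    rw [List.range_succ, List.map_append, List.foldl_append, ih (by omega)]
    simp only [List.map_cons, List.map_nil, List.foldl_cons, List.foldl_nil]
    set s := j + 1 - Bn with hs
    have hn : (PySem.List.pyGet? A ((j : Nat) : Int)).getD 0 = A[j] := by
      rw [PySem.List.pyGet?_natCast]
      simp [List.getElem?_eq_getElem hj']
    simp only [solveStep]
    rw [hn, pvMx_step, pvMn_step, ← pvW_snoc A s j (by omega) hj']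
    by_cases hc : Bn ≤ j + 1
    · have hcond : ((j : Nat) : Int) - ((s : Nat) : Int) + 1 = ((Bn : Nat) : Int) := by
        have : s = j + 1 - Bn := hs
        push_cast
        omega
      rw [if_pos hcond]
      have hs1 : j + 1 + 1 - Bn = s + 1 := by omega
      rw [hs1]
      have hslt : s < A.length := by omega
      have ha0 : (PySem.List.pyGet? A ((s : Nat) : Int)).getD 0 = A[s]'hslt := by
        rw [PySem.List.pyGet?_natCast]
        simp [List.getElem?_eq_getElem hslt]
      rw [ha0]
      have hw1 : pvW A s (j+1) = A[s]'hslt :: pvW A (s+1) (j+1) :=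
        pvW_cons A s (j+1) (by omega) (by omega)
      simp only [Prod.mk.injEq]
      refine ⟨?_, ?_, ?_, ?_⟩
      · rw [hw1]; exact pvMx_popleft _ _
      · rw [hw1]; exact pvMn_popleft _ _
      · simp only [pvAns]
        rw [← hs, if_pos hc]
      · push_cast; omega
    · have hs0 : s = 0 := by omega
      have hcond : ¬ (((j : Nat) : Int) - ((s : Nat) : Int) + 1 = ((Bn : Nat) : Int)) := by
        rw [hs0]
        push_cast
        omega
      rw [if_neg hcond]
      have hs1 : j + 1 + 1 - Bn = s := by omega
      rw [hs1]
      simp only [Prod.mk.injEq, and_true, true_and]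
      simp only [pvAns]
      rw [← hs, if_neg (by omega)]
      simp

lemma solve_eq_ans (A : List Int) (Bn : Nat) (hB : 1 ≤ Bn) :
    solve A (Bn : Int) = PySem.Int.mod (pvAns A Bn A.length) 1000000007 := by
  unfold solve
  show PySem.Int.mod (((PySem.List.pyRange 0 ((A.length : Int)) 1).foldl
      (solveStep A ((Bn : Nat) : Int)) ([], [], 0, 0)).2.2.1) 1000000007 = _
  rw [PySem.List.pyRange_one]
  have h1 : (((A.length : Int)) - 0).toNat = A.length := by omega
  rw [h1]
  have h2 : (List.range A.length).map (fun k : Nat => (0 : Int) + (k : Int)) =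
      (List.range A.length).map (fun k : Nat => ((k : Nat) : Int)) :=
    List.map_congr_left (fun k _ => by simp)
  rw [h2, solve_inv A Bn hB A.length le_rfl]

lemma pvAns_eq_altSum (A : List Int) (Bn : Nat) (hB : 1 ≤ Bn) (j : Nat) (hj : j ≤ A.length) :
    pvAns A Bn j =
      ((List.range (j+1-Bn)).map (fun k => ((k : Nat) : Int))).foldl
        (fun ans i =>
          let w := PySem.List.slice A (some i) (some (i + (Bn : Int)))
          ans + PySem.Int.mod ((PySem.List.max? w (fun y => y)).getD 0 +
                               (PySem.List.min? w (fun y => y)).getD 0) 1000000007) 0 := by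
  induction j with
  | zero => simp [pvAns, Nat.sub_eq_zero_of_le hB]
  | succ j ih =>
    have ihj := ih (by omega)
    by_cases hc : Bn ≤ j + 1
    · have h1 : j + 1 + 1 - Bn = (j + 1 - Bn) + 1 := by omega
      rw [h1, List.range_succ, List.map_append, List.foldl_append]
      simp only [List.map_cons, List.map_nil, List.foldl_cons, List.foldl_nil]
      rw [← ihj]
      simp only [pvAns]
      rw [if_pos hc]
      congr 1
      set i := j + 1 - Bn with hi
      have hsl : PySem.List.slice A (some ((i : Nat) : Int))
          (some (((i : Nat) : Int) + ((Bn : Nat) : Int))) = pvW A i (i + Bn) := by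
        rw [PySem.List.slice_natCast_add]
        unfold pvW
        rw [show i + Bn - i = Bn by omega]
      rw [hsl]
      have hiB : i + Bn = j + 1 := by omega
      rw [hiB]
      have hwne : pvW A i (j+1) ≠ [] := by
        unfold pvW
        intro hnil
        have hlen := congrArg List.length hnil
        simp at hlen
        omega
      rw [max?_eq_pvMx_head _ hwne, min?_eq_pvMn_head _ hwne]
    · have h1 : j + 1 + 1 - Bn = j + 1 - Bn := by omega
      rw [h1, ← ihj]
      simp only [pvAns]
      rw [if_neg (by omega)]
      simp

lemma pvAns_zero (A : List Int) (Bn : Nat) : ∀ j, j < Bn → pvAns A Bn j = 0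
  | 0, _ => rfl
  | j+1, h => by
    simp only [pvAns]
    rw [if_neg (by omega), pvAns_zero A Bn j (by omega)]
    simp

lemma lowB_aux (A : List Int) (B : Int) (hB : B < 1) :
    ∀ (l : List Int), (∀ j ∈ l, 0 ≤ j) → ∀ q1 q2,
      ((l.foldl (solveStep A B) (q1, q2, (0 : Int), (0 : Int)))).2.2 = (0, 0) := by
  intro l
  induction l with
  | nil => intro _ q1 q2; rfl
  | cons j l ih =>
    intro hpos q1 q2
    have hj : 0 ≤ j := hpos j (by simp)
    rw [List.foldl_cons]
    have hcond : ¬ (j - (0 : Int) + 1 = B) := by omega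
    simp only [solveStep, if_neg hcond]
    exact ih (fun x hx => hpos x (by simp [hx])) _ _

lemma solve_lowB (A : List Int) (B : Int) (hB : B < 1) : solve A B = 0 := by
  unfold solve
  have h := lowB_aux A B hB (PySem.List.pyRange 0 (A.length : Int) 1)
    (fun j hj => ((PySem.List.mem_pyRange_one).1 hj).1) [] []
  show PySem.Int.mod (((PySem.List.pyRange 0 ((A.length : Int)) 1).foldl
      (solveStep A B) ([], [], 0, 0)).2.2.1) 1000000007 = 0
  rw [h]
  simp [PySem.Int.mod]

theorem solve_eq_alt (A : List Int) (B : Int) : solve A B = solve_alt A B := by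
  by_cases hB1 : B < 1
  · rw [solve_lowB A B hB1]
    unfold solve_alt
    rw [if_pos (Or.inl hB1)]
  · obtain ⟨Bn, rfl⟩ : ∃ Bn : Nat, B = (Bn : Int) :=
      ⟨B.toNat, (Int.toNat_of_nonneg (by omega)).symm⟩
    have hBn : 1 ≤ Bn := by omega
    rw [solve_eq_ans A Bn hBn]
    by_cases hlen : (A.length : Int) < (Bn : Int)
    · unfold solve_alt
      rw [if_pos (Or.inr hlen)]
      rw [pvAns_zero A Bn A.length (by exact_mod_cast hlen)]
      simp [PySem.Int.mod]
    · unfold solve_alt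
      rw [if_neg (by omega)]
      rw [pvAns_eq_altSum A Bn hBn A.length le_rfl]
      congr 1
      rw [PySem.List.pyRange_one]
      have h1 : ((((A.length : Int)) - (Bn : Int) + 1) - 0).toNat = A.length + 1 - Bn := by
        omega
      have h2 : (List.range (A.length + 1 - Bn)).map (fun k : Nat => (0 : Int) + (k : Int)) =
          (List.range (A.length + 1 - Bn)).map (fun k : Nat => ((k : Nat) : Int)) :=
        List.map_congr_left (fun k _ => by simp)
      rw [h1, h2]

-- ===== VERDICT (by name: the statement is the Claim_ definition above) =====
theorem solve_spec : Claim_equal_solve := by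
  intro A B _
  unfold Spec_solve
  exact solve_eq_alt A B
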